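-- pv_equiv track=rewrite | github.com/grandma2368/cpv2-repos-cocotte | utils.py | add_multiplication
-- ===== SOURCE A (Python) =====
-- def add_multiplication(input):
--     index = 0
--     number = False
--     while index < len(input):
--         if input[index].isalpha() and number:
--             input = input[:index] + '*' + input[index:]
--         if input[index].isdigit():
--             number = True
--         else:
--             number = False
--         index += 1
--     return input
-- ===== SOURCE B (Python) =====
-- def add_multiplication(input):
--     body = ''.join(p + ('*' if p.isdigit() and n.isalpha() else '')
--                    for p, n in zip(input, input[1:]))
--     return body + (input[-1] if input else '')
-- ===== Notes on version B (the rewrite author's own statement) =====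
-- stated objective: alternative
-- what changed: Replaced A's index loop that re-splices the whole string at every digit->letter boundary (tracking a 'previous char was digit' flag) with a single comprehension over adjacent character pairs zip(input, input[1:]) that emits each char plus a '*' exactly at digit->letter boundaries, then appends the last char.
import Mathlib
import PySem

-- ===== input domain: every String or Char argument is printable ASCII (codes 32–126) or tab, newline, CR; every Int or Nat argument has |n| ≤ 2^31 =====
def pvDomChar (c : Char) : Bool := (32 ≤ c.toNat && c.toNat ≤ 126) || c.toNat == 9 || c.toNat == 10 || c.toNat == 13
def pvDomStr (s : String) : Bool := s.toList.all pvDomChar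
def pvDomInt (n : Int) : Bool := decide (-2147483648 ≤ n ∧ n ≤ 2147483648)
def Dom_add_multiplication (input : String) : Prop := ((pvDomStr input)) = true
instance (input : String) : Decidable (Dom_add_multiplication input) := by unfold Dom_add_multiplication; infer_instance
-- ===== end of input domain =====

-- B is a single left-to-right pass over adjacent character pairs instead of A's
-- index loop that re-splices the whole string at each insertion; same return value.

-- ===== PORT A =====
-- A's while loop, with a fuel bound sufficient for termination (the loop runs at
-- most once per original char plus once per inserted '*', ≤ 2·len+1 steps).
def pvA_loop : Nat → List Char → Nat → Bool → List Char
  | 0, s, _, _ => s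
  | fuel+1, s, index, number =>
    if index < s.length then
      let s' := if (s.getD index ' ').isAlpha && number then
                  s.take index ++ '*' :: s.drop index
                else s
      let number' := (s'.getD index ' ').isDigit
      pvA_loop fuel s' (index + 1) number'
    else s

def add_multiplication (input : String) : String :=
  String.mk (pvA_loop (2 * input.toList.length + 1) input.toList 0 false)

-- ===== PORT B =====
def pvB_piece (p : Char × Char) : List Char :=
  if p.1.isDigit && p.2.isAlpha then [p.1, '*'] else [p.1]

def add_multiplication_alt (input : String) : String :=
  let cs := input.toList
  let body := ((cs.zip cs.tail).map pvB_piece).flatten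
  String.mk (body ++ (match cs.getLast? with | some c => [c] | none => []))

-- ===== PRECONDITION & SPEC =====
def Spec_add_multiplication (input : String) (out : String) : Prop := out = add_multiplication_alt input
instance (input : String) (out : String) : Decidable (Spec_add_multiplication input out) := by unfold Spec_add_multiplication; infer_instance

-- ===== CLAIM (what is proved, stated in full; the proofs are below) =====
def Claim_equal_add_multiplication : Prop := ∀ (input : String), Dom_add_multiplication input → Spec_add_multiplication input (add_multiplication input)

-- ===== LEMMAS AND PROOFS =====

-- common reference function: processes the remaining chars, `b` = "previous char was a digit"
def pvF : Bool → List Char → List Char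
  | _, [] => []
  | b, c :: rest => (if c.isAlpha && b then ['*'] else []) ++ c :: pvF c.isDigit rest

-- body of B's port, as a function of the char list
def pvG (cs : List Char) : List Char :=
  ((cs.zip cs.tail).map pvB_piece).flatten ++
    (match cs.getLast? with | some c => [c] | none => [])

def pvLead (b : Bool) (cs : List Char) : List Char :=
  match cs with
  | [] => []
  | c :: _ => if c.isAlpha && b then ['*'] else []

lemma pv_alpha_not_digit {c : Char} (h : c.isAlpha = true) : c.isDigit = false := by
  by_contra hne
  have hd : c.isDigit = true := by cases h2 : c.isDigit <;> simp_all
  clear hne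
  simp only [Char.isAlpha, Char.isUpper, Char.isLower, Char.isDigit, Bool.or_eq_true,
    Bool.and_eq_true, decide_eq_true_eq, UInt32.le_iff_toNat_le] at h hd
  have e1 : 'A'.val.toNat = 65 := rfl
  have e2 : 'Z'.val.toNat = 90 := rfl
  have e3 : 'a'.val.toNat = 97 := rfl
  have e4 : 'z'.val.toNat = 122 := rfl
  have e5 : '0'.val.toNat = 48 := rfl
  have e6 : '9'.val.toNat = 57 := rfl
  simp only [e1, e2, e3, e4, e5, e6] at h hd
  omega

lemma pv_getD_mid (pre l : List Char) (c : Char) :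
    (pre ++ c :: l).getD pre.length ' ' = c := by
  rw [List.getD_eq_getElem?_getD, List.getElem?_append_right (le_refl _)]
  simp

lemma pv_stepIns (fuel : Nat) (pre rest : List Char) (c : Char)
    (halpha : c.isAlpha = true) :
    pvA_loop (fuel + 1) (pre ++ c :: rest) pre.length true
      = pvA_loop fuel (pre ++ '*' :: c :: rest) (pre.length + 1) false := by
  have hlt : pre.length < (pre ++ c :: rest).length := by simp
  have hg := pv_getD_mid pre rest c
  have hg2 := pv_getD_mid pre (c :: rest) '*'
  simp only [pvA_loop, if_pos hlt, hg, halpha, Bool.and_self, if_pos trivial]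
  simp [List.take_left', List.drop_left']

lemma pv_stepNo (fuel : Nat) (pre rest : List Char) (c : Char) (b : Bool)
    (hb : (c.isAlpha && b) = false) :
    pvA_loop (fuel + 1) (pre ++ c :: rest) pre.length b
      = pvA_loop fuel (pre ++ c :: rest) (pre.length + 1) c.isDigit := by
  have hlt : pre.length < (pre ++ c :: rest).length := by simp
  have hg := pv_getD_mid pre rest c
  simp only [pvA_loop, if_pos hlt, hg, hb]
  simp

lemma pvA_loop_eq (suf : List Char) : ∀ (pre : List Char) (b : Bool) (fuel : Nat),
    2 * suf.length + 1 ≤ fuel →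
    pvA_loop fuel (pre ++ suf) pre.length b = pre ++ pvF b suf := by
  induction suf with
  | nil =>
    intro pre b fuel hf
    simp only [List.length_nil] at hf
    obtain ⟨m, rfl⟩ : ∃ m, fuel = m + 1 := ⟨fuel - 1, by omega⟩
    simp [pvA_loop, pvF]
  | cons c rest ih =>
    intro pre b fuel hf
    simp only [List.length_cons] at hf
    obtain ⟨m, rfl⟩ : ∃ m, fuel = m + 1 := ⟨fuel - 1, by omega⟩
    by_cases hb : (c.isAlpha && b) = true
    · have halpha : c.isAlpha = true := by
        cases h : c.isAlpha <;> simp_all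
      have hbt : b = true := by cases b <;> simp_all
      subst hbt
      obtain ⟨m', rfl⟩ : ∃ m', m = m' + 1 := ⟨m - 1, by omega⟩
      rw [pv_stepIns (m' + 1) pre rest c halpha]
      have hre : pre ++ '*' :: c :: rest = (pre ++ ['*']) ++ c :: rest := by simp
      have hlen : pre.length + 1 = (pre ++ ['*']).length := by simp
      rw [hre, hlen, pv_stepNo m' (pre ++ ['*']) rest c false (by simp)]
      have hre2 : (pre ++ ['*']) ++ c :: rest = ((pre ++ ['*']) ++ [c]) ++ rest := by simp
      have hlen2 : (pre ++ ['*']).length + 1 = ((pre ++ ['*']) ++ [c]).length := by simp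
      rw [hre2, hlen2, ih _ c.isDigit m' (by omega)]
      simp [pvF, hb, pv_alpha_not_digit halpha]
    · have hbf : (c.isAlpha && b) = false := by cases h : (c.isAlpha && b) <;> simp_all
      rw [pv_stepNo m pre rest c b hbf]
      have hre : pre ++ c :: rest = (pre ++ [c]) ++ rest := by simp
      have hlen : pre.length + 1 = (pre ++ [c]).length := by simp
      rw [hre, hlen, ih (pre ++ [c]) c.isDigit m (by omega)]
      simp [pvF, hbf]

lemma pvF_eq_pvG (cs : List Char) : ∀ b, pvF b cs = pvLead b cs ++ pvG cs := by
  induction cs with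
  | nil => intro b; simp [pvF, pvLead, pvG]
  | cons c rest ih =>
    intro b
    have hkey : pvG (c :: rest) = c :: (pvLead c.isDigit rest ++ pvG rest) := by
      cases rest with
      | nil => simp [pvG, pvLead]
      | cons d rest' =>
        simp only [pvG, pvLead, List.tail_cons, List.zip_cons_cons, List.map_cons,
          List.flatten_cons, List.getLast?_cons_cons, pvB_piece]
        cases hc : c.isDigit <;> cases hd : d.isAlpha <;> simp_all
    calc pvF b (c :: rest)
        = (if c.isAlpha && b then ['*'] else []) ++ c :: pvF c.isDigit rest := rfl
      _ = pvLead b (c :: rest) ++ c :: (pvLead c.isDigit rest ++ pvG rest) := by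
          rw [ih c.isDigit]; rfl
      _ = pvLead b (c :: rest) ++ pvG (c :: rest) := by rw [hkey]

-- ===== VERDICT (by name: the statement is the Claim_ definition above) =====
theorem add_multiplication_spec : Claim_equal_add_multiplication := by
  intro input _
  show add_multiplication input = add_multiplication_alt input
  unfold add_multiplication add_multiplication_alt
  have h1 := pvA_loop_eq input.toList [] false (2 * input.toList.length + 1) (by omega)
  simp only [List.nil_append, List.length_nil] at h1
  rw [h1, pvF_eq_pvG input.toList false]
  cases input.toList with
  | nil => rfl
  | cons c rest => simp [pvLead, pvG]
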